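-- pv_equiv track=rewrite | github.com/pypi-data/pypi-mirror-384 | packages/supy/supy-2025.10.15-cp313-cp313-win_amd64.whl/supy/data_model/validation/pipeline/phase_a.py | handle_renamed_parameters
-- ===== SOURCE A (Python) =====
-- RENAMED_PARAMS = {
--     "cp": "rho_cp",
--     "diagmethod": "rslmethod",
--     "localclimatemethod": "rsllevel",
--     "chanohm": "ch_anohm",
--     "cpanohm": "rho_cp_anohm",
--     "kkanohm": "k_anohm",
-- }
--
-- def handle_renamed_parameters(yaml_content: str):
--     lines = yaml_content.split("\n")
--     replacements = []
--     for i, line in enumerate(lines):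
--         stripped = line.strip()
--         for old_key, new_key in RENAMED_PARAMS.items():
--             if stripped.startswith(f"{old_key}:"):
--                 indent = line[: len(line) - len(stripped)]
--                 value = stripped.split(":", 1)[1].strip()
--                 lines[i] = (
--                     f'{indent}{new_key}: {value}  #RENAMED IN STANDARD - Found "{old_key}" and changed into "{new_key}"'
--                 )
--                 replacements.append((old_key, new_key))
--     return "\n".join(lines), replacements
-- ===== SOURCE B (Python) =====
-- RENAMED_PARAMS = {
--     "cp": "rho_cp",
--     "diagmethod": "rslmethod",
--     "localclimatemethod": "rsllevel",
--     "chanohm": "ch_anohm",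
--     "cpanohm": "rho_cp_anohm",
--     "kkanohm": "k_anohm",
-- }
--
--
-- def _process_line(line):
--     stripped = line.strip()
--     parts = stripped.split(":", 1)
--     new_key = RENAMED_PARAMS.get(parts[0]) if len(parts) == 2 else None
--     if new_key is None:
--         return line, None
--     old_key = parts[0]
--     value = parts[1].strip()
--     indent = line[: len(line) - len(stripped)]
--     return (
--         f'{indent}{new_key}: {value}  #RENAMED IN STANDARD - Found "{old_key}" and changed into "{new_key}"',
--         (old_key, new_key),
--     )
--
--
-- def handle_renamed_parameters(yaml_content: str):
--     # one streaming pass over the characters; lines are processed as they close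
--     out_lines = []
--     replacements = []
--     buf = []
--     for ch in yaml_content:
--         if ch == "\n":
--             new_line, rep = _process_line("".join(buf))
--             out_lines.append(new_line)
--             if rep is not None:
--                 replacements.append(rep)
--             buf = []
--         else:
--             buf.append(ch)
--     new_line, rep = _process_line("".join(buf))
--     out_lines.append(new_line)
--     if rep is not None:
--         replacements.append(rep)
--     return "\n".join(out_lines), replacements
-- ===== Notes on version B (the rewrite author's own statement) =====
-- stated objective: alternative
-- what changed: B is a single character-level streaming pass: instead of splitting into a lines list and rewriting it in place, it accumulates each line in a buffer and, when the line closes, a helper parses it once at its first colon and replaces A's six startswith probes with one dict lookup of the parsed key prefix.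
import Mathlib
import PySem

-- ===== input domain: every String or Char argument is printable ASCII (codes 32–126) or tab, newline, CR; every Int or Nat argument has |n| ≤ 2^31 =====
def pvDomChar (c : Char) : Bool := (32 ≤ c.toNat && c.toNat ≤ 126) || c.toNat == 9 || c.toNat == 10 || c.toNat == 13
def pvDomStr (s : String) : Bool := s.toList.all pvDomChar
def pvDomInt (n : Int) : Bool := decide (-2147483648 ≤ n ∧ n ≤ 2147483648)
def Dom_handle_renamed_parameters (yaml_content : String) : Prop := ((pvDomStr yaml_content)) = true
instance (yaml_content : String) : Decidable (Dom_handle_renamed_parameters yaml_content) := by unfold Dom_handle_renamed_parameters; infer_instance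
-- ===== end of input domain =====

-- B replaces A's split-into-lines-and-rewrite-in-place loop with one character-level streaming
-- pass that closes each line at a newline and renames via a single dict lookup of the text before
-- the first colon instead of A's six startswith probes (objective: alternative; no speed claim).

-- ===== PORT A =====
-- RENAMED_PARAMS.items(), in insertion order
def renamedParams : List (String × String) :=
  [("cp", "rho_cp"), ("diagmethod", "rslmethod"), ("localclimatemethod", "rsllevel"),
   ("chanohm", "ch_anohm"), ("cpanohm", "rho_cp_anohm"), ("kkanohm", "k_anohm")]

-- the body of A's 'for i, line in enumerate(lines)' loop; state = (lines so far, replacements)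
def stepA (st : List String × List (String × String)) (line : String) :
    List String × List (String × String) :=
  let stripped := PySem.Str.strip line
  -- inner loop: for old_key, new_key in RENAMED_PARAMS.items(); state = (current lines[i], replacements)
  let inner := fun (st2 : String × List (String × String)) (p : String × String) =>
    if PySem.Str.startswith stripped (p.1 ++ ":") then
      let indent := PySem.Str.slice line none (some (PySem.Str.len line - PySem.Str.len stripped))
      -- stripped.split(":", 1)[1]: under the startswith guard index 1 exists, so pyGetD is exact
      let value := PySem.Str.strip (PySem.List.pyGetD ((PySem.Str.splitMax? stripped ":" 1).getD []) 1 "")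
      (indent ++ p.2 ++ ": " ++ value ++ "  #RENAMED IN STANDARD - Found \"" ++ p.1 ++ "\" and changed into \"" ++ p.2 ++ "\"",
       st2.2 ++ [(p.1, p.2)])
    else st2
  let r := renamedParams.foldl inner (line, st.2)
  (st.1 ++ [r.1], r.2)

def handle_renamed_parameters (yaml_content : String) : String × (List (String × String)) :=
  let lines := (PySem.Str.split? yaml_content "\n").getD []   -- sep "\n" ≠ "", so split? is some
  let res := lines.foldl stepA ([], [])
  (PySem.Str.join "\n" res.1, res.2)

-- ===== PORT B =====
-- RENAMED_PARAMS as a dict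
def renamedDict : PySem.Dict String String :=
  PySem.Dict.ofList [("cp", "rho_cp"), ("diagmethod", "rslmethod"), ("localclimatemethod", "rsllevel"),
                     ("chanohm", "ch_anohm"), ("cpanohm", "rho_cp_anohm"), ("kkanohm", "k_anohm")]

-- _process_line: parse once at the first ':', one dict lookup of the prefix
def procB (line : String) : String × Option (String × String) :=
  let stripped := PySem.Str.strip line
  let parts := (PySem.Str.splitMax? stripped ":" 1).getD []   -- sep ":" ≠ "", so splitMax? is some
  let hit := if parts.length = 2 then renamedDict.get? (PySem.List.pyGetD parts 0 "") else none
  match hit with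
  | none => (line, none)
  | some new_key =>
    let old_key := PySem.List.pyGetD parts 0 ""
    let value := PySem.Str.strip (PySem.List.pyGetD parts 1 "")
    let indent := PySem.Str.slice line none (some (PySem.Str.len line - PySem.Str.len stripped))
    (indent ++ new_key ++ ": " ++ value ++ "  #RENAMED IN STANDARD - Found \"" ++ old_key ++ "\" and changed into \"" ++ new_key ++ "\"",
     some (old_key, new_key))

-- the body of B's 'for ch in yaml_content' loop; state = (out_lines, buf, replacements)
def stepC (st : List String × List Char × List (String × String)) (c : Char) :
    List String × List Char × List (String × String) :=
  if c = '\n' then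
    let r := procB (String.ofList st.2.1)
    (st.1 ++ [r.1], ([] : List Char),
     match r.2 with | some p => st.2.2 ++ [p] | none => st.2.2)
  else (st.1, st.2.1 ++ [c], st.2.2)

def handle_renamed_parameters_alt (yaml_content : String) : String × (List (String × String)) :=
  let s := yaml_content.toList.foldl stepC ([], [], [])
  -- final flush of the open line
  let r := procB (String.ofList s.2.1)
  let outs := s.1 ++ [r.1]
  let reps := match r.2 with | some p => s.2.2 ++ [p] | none => s.2.2
  (PySem.Str.join "\n" outs, reps)

-- ===== PRECONDITION & SPEC =====
def Spec_handle_renamed_parameters (yaml_content : String) (out : String × (List (String × String))) : Prop := out = handle_renamed_parameters_alt yaml_content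
instance (yaml_content : String) (out : String × (List (String × String))) : Decidable (Spec_handle_renamed_parameters yaml_content out) := by unfold Spec_handle_renamed_parameters; infer_instance

-- ===== CLAIM (what is proved, stated in full; the proofs are below) =====
def Claim_equal_handle_renamed_parameters : Prop := ∀ (yaml_content : String), Dom_handle_renamed_parameters yaml_content → Spec_handle_renamed_parameters yaml_content (handle_renamed_parameters yaml_content)

-- ===== LEMMAS AND PROOFS =====

-- splitOnMax.go with maxsplit exhausted returns the rest as one piece
theorem goZero (sep : List Char) (fuel : Nat) (l cur : List Char) (acc : List (List Char)) :
    PySem.Chars.splitOnMax.go sep fuel 0 l cur acc = acc.reverse ++ [cur.reverse ++ l] := by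
  cases fuel <;> cases l <;> simp [PySem.Chars.splitOnMax.go]

-- splitOnMax.go with maxsplit 1 splits at the first ':' if any
theorem goOne (l : List Char) (cur : List Char) (acc : List (List Char)) (fuel : Nat)
    (h : l.length < fuel) :
    PySem.Chars.splitOnMax.go [':'] fuel 1 l cur acc =
      acc.reverse ++ (if ':' ∈ l then
        [cur.reverse ++ l.takeWhile (· ≠ ':'), (l.dropWhile (· ≠ ':')).drop 1]
      else [cur.reverse ++ l]) := by
  induction l generalizing cur acc fuel with
  | nil =>
    cases fuel with
    | zero => omega
    | succ f => simp [PySem.Chars.splitOnMax.go]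
  | cons c rest ih =>
    cases fuel with
    | zero => omega
    | succ f =>
      by_cases hc : c = ':'
      · subst hc
        simp [PySem.Chars.splitOnMax.go, List.isPrefixOf, goZero]
      · have hp : [':'].isPrefixOf (c :: rest) = false := by
          simp [List.isPrefixOf]; exact fun h => absurd h.symm hc
        simp only [PySem.Chars.splitOnMax.go, hp]
        rw [ih _ _ f (by simpa using Nat.lt_of_succ_lt_succ h)]
        by_cases hm : ':' ∈ rest <;> simp [hm, hc, Ne.symm hc]

-- s.split(":", 1) on char lists
theorem splitColon (s : List Char) :
    PySem.Chars.splitOnMax s [':'] 1 =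
      if ':' ∈ s then [s.takeWhile (· ≠ ':'), (s.dropWhile (· ≠ ':')).drop 1] else [s] := by
  rw [PySem.Chars.splitOnMax]
  simp [goOne s [] [] (s.length + 1) (by omega)]

theorem takeWhileColonAppend (k t : List Char) (hk : ':' ∉ k) :
    (k ++ ':' :: t).takeWhile (· ≠ ':') = k := by
  induction k with
  | nil => simp
  | cons a k ih =>
    simp only [List.mem_cons, not_or] at hk
    rw [List.cons_append, List.takeWhile_cons_of_pos (by simp [Ne.symm hk.1]), ih hk.2]

-- stripped.startswith(old_key + ":") holds iff ':' occurs and the text before the first ':' is old_key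
theorem startswithColon (k s : List Char) (hk : ':' ∉ k) :
    (k ++ [':']).isPrefixOf s = true ↔ (':' ∈ s ∧ s.takeWhile (· ≠ ':') = k) := by
  rw [List.isPrefixOf_iff_prefix]
  constructor
  · rintro ⟨t, rfl⟩
    constructor
    · simp
    · simpa using takeWhileColonAppend k t hk
  · rintro ⟨hmem, htw⟩
    have hsplit : s = s.takeWhile (· ≠ ':') ++ s.dropWhile (· ≠ ':') := (List.takeWhile_append_dropWhile).symm
    have hne : s.dropWhile (· ≠ ':') ≠ [] := by
      intro hnil
      have := hsplit
      rw [hnil, List.append_nil] at this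
      rw [this] at hmem
      have := List.mem_takeWhile_imp hmem
      simp at this
    obtain ⟨c, rest, hcr⟩ := List.exists_cons_of_ne_nil hne
    have hchead : c = ':' := by
      have h2 := List.head_dropWhile_not (p := (· ≠ ':')) (l := s) (by rw [hcr]; simp)
      simp only [hcr] at h2
      simpa using h2
    refine ⟨rest, ?_⟩
    rw [hsplit, htw, hcr, hchead]
    simp

theorem partsEq (s : String) :
    (PySem.Str.splitMax? s ":" 1).getD [] =
      if ':' ∈ s.toList then
        [String.ofList (s.toList.takeWhile (· ≠ ':')), String.ofList ((s.toList.dropWhile (· ≠ ':')).drop 1)]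
      else [s] := by
  have h : (":" : String).toList = [':'] := rfl
  simp only [PySem.Str.splitMax?, PySem.Chars.splitMax?, h]
  rw [if_neg (by simp)]
  rw [splitColon]
  split_ifs <;> simp

theorem startswithStr (k s : String) (hk : ':' ∉ k.toList) :
    PySem.Str.startswith s (k ++ ":") =
      (decide (':' ∈ s.toList) && decide (s.toList.takeWhile (· ≠ ':') = k.toList)) := by
  rw [PySem.Str.startswith, PySem.Chars.startswith, String.toList_append,
      show (":" : String).toList = [':'] from rfl]
  by_cases h : (':' ∈ s.toList ∧ s.toList.takeWhile (· ≠ ':') = k.toList)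
  · rw [(startswithColon k.toList s.toList hk).mpr h]
    simp only [decide_not] at h
    simp [h.1, h.2]
  · have hfalse : (k.toList ++ [':']).isPrefixOf s.toList = false := by
      rw [Bool.eq_false_iff]
      intro hc
      exact h ((startswithColon k.toList s.toList hk).mp hc)
    rw [hfalse]
    rw [not_and_or] at h
    simp only [decide_not] at h
    rcases h with h | h <;> simp [h]

theorem ofListEqStr (b : List Char) (k : String) : (String.ofList b = k) ↔ b = k.toList := by
  constructor
  · intro h; rw [← h, String.toList_ofList]
  · intro h; rw [h, String.ofList_toList]

theorem renamedDict_items : renamedDict.items = [("cp","rho_cp"),("diagmethod","rslmethod"),("localclimatemethod","rsllevel"),("chanohm","ch_anohm"),("cpanohm","rho_cp_anohm"),("kkanohm","k_anohm")] := by decide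

theorem renamedDict_get (q : String) : renamedDict.get? q =
    if q = "cp" then some "rho_cp" else if q = "diagmethod" then some "rslmethod"
    else if q = "localclimatemethod" then some "rsllevel" else if q = "chanohm" then some "ch_anohm"
    else if q = "cpanohm" then some "rho_cp_anohm" else if q = "kkanohm" then some "k_anohm" else none := by
  simp only [PySem.Dict.get?, renamedDict_items, List.find?]
  split_ifs with h1 h2 h3 h4 h5 h6
  · subst h1; decide
  · subst h2; decide
  · subst h3; decide
  · subst h4; decide
  · subst h5; decide
  · subst h6; decide
  · simp [beq_eq_false_iff_ne.mpr (Ne.symm h1), beq_eq_false_iff_ne.mpr (Ne.symm h2),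
          beq_eq_false_iff_ne.mpr (Ne.symm h3), beq_eq_false_iff_ne.mpr (Ne.symm h4),
          beq_eq_false_iff_ne.mpr (Ne.symm h5), beq_eq_false_iff_ne.mpr (Ne.symm h6)]

-- A's per-line inner loop computes exactly B's per-line parse
theorem stepA_eq (st : List String × List (String × String)) (line : String) :
    stepA st line = (st.1 ++ [(procB line).1], st.2 ++ (procB line).2.toList) := by
  simp only [stepA, procB]
  by_cases hc : ':' ∈ PySem.Chars.strip line.toList
  · have hp := partsEq (PySem.Str.strip line)
    rw [PySem.Str.toList_strip, if_pos hc] at hp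
    simp only [hp,
      renamedParams, List.foldl_cons, List.foldl_nil,
      startswithStr "cp" _ (by decide), startswithStr "diagmethod" _ (by decide),
      startswithStr "localclimatemethod" _ (by decide), startswithStr "chanohm" _ (by decide),
      startswithStr "cpanohm" _ (by decide), startswithStr "kkanohm" _ (by decide),
      List.length_cons, List.length_nil, PySem.List.pyGetD_zero_cons, renamedDict_get,
      PySem.Str.toList_strip, hc]
    set TW := List.takeWhile (fun x => decide (x ≠ ':')) (PySem.Chars.strip line.toList) with hTW
    by_cases h1 : TW = ['c','p']
    · simp [h1]
    by_cases h2 : TW = ['d','i','a','g','m','e','t','h','o','d']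
    · simp [h2]
    by_cases h3 : TW = ['l','o','c','a','l','c','l','i','m','a','t','e','m','e','t','h','o','d']
    · simp [h3]
    by_cases h4 : TW = ['c','h','a','n','o','h','m']
    · simp [h4]
    by_cases h5 : TW = ['c','p','a','n','o','h','m']
    · simp [h5]
    by_cases h6 : TW = ['k','k','a','n','o','h','m']
    · simp [h6]
    simp [h1, h2, h3, h4, h5, h6, ofListEqStr]
  · have hp := partsEq (PySem.Str.strip line)
    rw [PySem.Str.toList_strip, if_neg hc] at hp
    simp only [hp,
      renamedParams, List.foldl_cons, List.foldl_nil,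
      startswithStr "cp" _ (by decide), startswithStr "diagmethod" _ (by decide),
      startswithStr "localclimatemethod" _ (by decide), startswithStr "chanohm" _ (by decide),
      startswithStr "cpanohm" _ (by decide), startswithStr "kkanohm" _ (by decide),
      PySem.Str.toList_strip]
    simp [hc]

-- A's outer loop appends one processed line and the optional replacement per line
theorem foldA_eq (lines : List String) (acc : List String) (reps : List (String × String)) :
    lines.foldl stepA (acc, reps) =
      (acc ++ lines.map (fun l => (procB l).1),
       reps ++ lines.flatMap (fun l => (procB l).2.toList)) := by
  induction lines generalizing acc reps with
  | nil => simp
  | cons l ls ih => rw [List.foldl_cons, stepA_eq, ih]; simp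

-- the Python-exact splitter on '\n' is Mathlib's List.splitOn
theorem goNL (l : List Char) (cur : List Char) (acc : List (List Char)) (fuel : Nat)
    (h : l.length < fuel) :
    PySem.Chars.splitOn.go ['\n'] fuel l cur acc =
      acc.reverse ++ List.modifyHead (cur.reverse ++ ·) (l.splitOn '\n') := by
  induction l generalizing cur acc fuel with
  | nil =>
    cases fuel with
    | zero => omega
    | succ f => simp [PySem.Chars.splitOn.go, List.splitOn]
  | cons c rest ih =>
    cases fuel with
    | zero => omega
    | succ f =>
      by_cases hc : c = '\n'
      · subst hc
        rw [show PySem.Chars.splitOn.go ['\n'] (f+1) ('\n' :: rest) cur acc =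
              PySem.Chars.splitOn.go ['\n'] f rest [] (cur.reverse :: acc) by
            simp [PySem.Chars.splitOn.go, List.isPrefixOf]]
        rw [ih [] (cur.reverse :: acc) f (by simpa using Nat.lt_of_succ_lt_succ h)]
        simp only [List.splitOn, List.splitOnP_cons]
        rw [if_pos (by simp)]
        cases List.splitOnP (fun x => x == '\n') rest <;> simp
      · have hp : ['\n'].isPrefixOf (c :: rest) = false := by
          simp [List.isPrefixOf]; exact fun h => absurd h.symm hc
        rw [show PySem.Chars.splitOn.go ['\n'] (f+1) (c :: rest) cur acc =
              PySem.Chars.splitOn.go ['\n'] f rest (c :: cur) acc by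
            simp [PySem.Chars.splitOn.go, hp]]
        rw [ih (c :: cur) acc f (by simpa using Nat.lt_of_succ_lt_succ h)]
        simp only [List.splitOn, List.splitOnP_cons]
        rw [if_neg (by simp [hc])]
        cases List.splitOnP (fun x => x == '\n') rest <;> simp

theorem splitNL (cs : List Char) : PySem.Chars.splitOn cs ['\n'] = cs.splitOn '\n' := by
  rw [PySem.Chars.splitOn, goNL cs [] [] (cs.length + 1) (by omega)]
  cases hs : cs.splitOn '\n' <;> simp

-- lines = yaml_content.split("\n") as strings
theorem linesEq (y : String) :
    (PySem.Str.split? y "\n").getD [] = (y.toList.splitOn '\n').map String.ofList := by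
  simp [PySem.Str.split?, PySem.Chars.split?, show ("\n" : String).toList = ['\n'] from rfl, splitNL]

-- flushing the optional replacement is appending its toList
theorem flushRep (rs : List (String × String)) (o : Option (String × String)) :
    (match o with | some p => rs ++ [p] | none => rs) = rs ++ o.toList := by
  cases o <;> simp

-- B's streaming pass, flushed, equals per-line processing of the split of buf ++ remaining chars
theorem foldC_eq (cs : List Char) (outs : List String) (buf : List Char)
    (reps : List (String × String)) :
    (let s := cs.foldl stepC (outs, buf, reps)
     ((s.1 ++ [(procB (String.ofList s.2.1)).1] : List String),
      (s.2.2 ++ ((procB (String.ofList s.2.1)).2.toList) : List (String × String)))) =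
      (outs ++ (List.modifyHead (buf ++ ·) (cs.splitOn '\n')).map (fun l => (procB (String.ofList l)).1),
       reps ++ (List.modifyHead (buf ++ ·) (cs.splitOn '\n')).flatMap (fun l => (procB (String.ofList l)).2.toList)) := by
  induction cs generalizing outs buf reps with
  | nil => simp [List.splitOn]
  | cons c cs ih =>
    by_cases hc : c = '\n'
    · subst hc
      rw [List.foldl_cons, show stepC (outs, buf, reps) '\n' =
            (outs ++ [(procB (String.ofList buf)).1], ([] : List Char),
             reps ++ ((procB (String.ofList buf)).2.toList)) by
          simp [stepC, flushRep]]
      rw [ih]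
      simp only [List.splitOn, List.splitOnP_cons]
      rw [if_pos (by simp)]
      cases List.splitOnP (fun x => x == '\n') cs <;> simp
    · rw [List.foldl_cons, show stepC (outs, buf, reps) c = (outs, buf ++ [c], reps) by
          simp [stepC, hc]]
      rw [ih]
      simp only [List.splitOn, List.splitOnP_cons]
      rw [if_neg (by simp [hc])]
      cases List.splitOnP (fun x => x == '\n') cs <;> simp

-- ===== VERDICT (by name: the statement is the Claim_ definition above) =====
theorem handle_renamed_parameters_spec : Claim_equal_handle_renamed_parameters := by
  intro y _
  unfold Spec_handle_renamed_parameters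
  show handle_renamed_parameters y = handle_renamed_parameters_alt y
  rw [handle_renamed_parameters, handle_renamed_parameters_alt]
  rw [linesEq, foldA_eq]
  have hB := foldC_eq y.toList [] [] []
  simp only at hB
  rcases hfold : y.toList.foldl stepC ([], [], []) with ⟨o, b, r⟩
  rw [hfold] at hB
  simp only at hB
  rw [flushRep]
  have h1 : o ++ [(procB (String.ofList b)).1] =
      (List.modifyHead (fun x => [] ++ x) (y.toList.splitOn '\n')).map (fun l => (procB (String.ofList l)).1) := by
    have := congrArg Prod.fst hB; simpa using this
  have h2 : r ++ ((procB (String.ofList b)).2.toList) =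
      (List.modifyHead (fun x => [] ++ x) (y.toList.splitOn '\n')).flatMap (fun l => (procB (String.ofList l)).2.toList) := by
    have := congrArg Prod.snd hB; simpa using this
  have hmid : List.modifyHead (fun x => ([] : List Char) ++ x) (y.toList.splitOn '\n') = y.toList.splitOn '\n' := by
    cases y.toList.splitOn '\n' <;> simp
  rw [hmid] at h1 h2
  rw [h1, h2]
  simp [List.map_map, List.flatMap_map, Function.comp_def]
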